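-- pv_equiv track=rewrite | github.com/Cho-El/Python-coding-test-practice | 라인 코테/5.py | solution
-- ===== SOURCE A (Python) =====
-- def solution(abilities,k):
--
-- 	abilities.sort(reverse = True)
-- 	rival = [0 for _ in range((len(abilities)+1) // 2)]
-- 	me = [0 for _ in range((len(abilities)+1) // 2)]
--
-- 	for i in range(len(abilities)):
-- 		if i % 2 == 0:
-- 			rival[i//2] += abilities[i]
-- 		else:
-- 			me[i//2] += abilities[i]
--
-- 	dif = []
-- 	for ix, (r,m) in enumerate(zip(rival, me)):
-- 		temp = r-m
-- 		dif.append([temp,ix])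
--
-- 	dif.sort(reverse = True, key = lambda x:x[0])
-- 	for i in range(k):
-- 		rival[dif[i][1]], me[dif[i][1]] = me[dif[i][1]], rival[dif[i][1]]
--
-- 	return sum(me)
-- ===== SOURCE B (Python) =====
-- def solution(abilities, k):
--     # Sorts `abilities` in place (descending), same observable mutation as the original.
--     abilities.sort(reverse=True)
--     total = 0          # sum of "my" scores (every second element)
--     diffs = []         # rival - me per consecutive pair (a lone last element pairs with 0)
--     i = 0
--     while i < len(abilities):
--         r = abilities[i]
--         m = abilities[i + 1] if i + 1 < len(abilities) else 0
--         total += m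
--         diffs.append(r - m)
--         i += 2
--     # top-k by repeated max extraction (selection), not by sorting the differences;
--     # raises (ValueError) when k exceeds the number of pairs, like the original (IndexError)
--     for _ in range(k):
--         best = max(diffs)
--         total += best
--         diffs.remove(best)
--     return total
-- ===== Notes on version B (the rewrite author's own statement) =====
-- stated objective: alternative
-- what changed: Replaces A's scatter into preallocated rival/me arrays, (diff,index) list, second sort and k-fold swap simulation by one two-at-a-time accumulation pass followed by top-k selection via repeated max extraction - the difference list is never sorted.
import Mathlib
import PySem

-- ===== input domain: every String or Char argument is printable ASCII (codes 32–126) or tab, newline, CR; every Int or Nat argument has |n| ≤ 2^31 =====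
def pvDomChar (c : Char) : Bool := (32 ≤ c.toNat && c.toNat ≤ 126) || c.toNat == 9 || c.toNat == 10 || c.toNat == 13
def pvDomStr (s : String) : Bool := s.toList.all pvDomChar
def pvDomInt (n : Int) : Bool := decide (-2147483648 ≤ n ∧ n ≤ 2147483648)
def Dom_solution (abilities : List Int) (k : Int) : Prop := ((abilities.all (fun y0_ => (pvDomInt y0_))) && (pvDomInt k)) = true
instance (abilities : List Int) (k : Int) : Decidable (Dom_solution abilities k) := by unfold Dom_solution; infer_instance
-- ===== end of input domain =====

-- B replaces A's scatter arrays, second sort and swap simulation by one accumulation pass plus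
-- top-k selection by repeated max extraction (objective: alternative — the diff list is never sorted).
-- Both Pythons sort `abilities` in place (same mutation); equivalence is about the return value.

-- ===== PORT A =====
def solution (abilities : List Int) (k : Int) : Int :=
  let ab := PySem.List.sorted abilities (fun x => x) true
  let m : Nat := (PySem.Int.floordiv ((ab.length : Int) + 1) 2).toNat
  let s1 := (PySem.List.pyRange 0 (ab.length : Int) 1).foldl
    (fun (s : List Int × List Int) (i : Int) =>
      if PySem.Int.mod i 2 == 0 then
        (s.1.set (PySem.Int.floordiv i 2).toNat
           (s.1.getD (PySem.Int.floordiv i 2).toNat 0 + PySem.List.pyGetD ab i 0), s.2)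
      else
        (s.1, s.2.set (PySem.Int.floordiv i 2).toNat
           (s.2.getD (PySem.Int.floordiv i 2).toNat 0 + PySem.List.pyGetD ab i 0)))
    (List.replicate m 0, List.replicate m 0)
  let dif := (PySem.List.enumerate (s1.1.zip s1.2) 0).map (fun p => (p.2.1 - p.2.2, p.1))
  let difS := PySem.List.sorted dif (fun x => x.1) true
  -- indices dif[i][1] are in range for every admitted input (Pre_solution); out of range Python raises
  let s2 := (PySem.List.pyRange 0 k 1).foldl
    (fun (s : List Int × List Int) (i : Int) =>
      let j := (PySem.List.pyGetD difS i (0, 0)).2.toNat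
      (s.1.set j (s.2.getD j 0), s.2.set j (s.1.getD j 0)))
    (s1.1, s1.2)
  s2.2.sum

-- ===== PORT B =====
-- Source B's `while i < len(abilities): … i += 2` written as the obvious structural recursion
-- consuming two elements per step; returns (total so far, diffs list in pass order).
def pairScanB : List Int → Int × List Int
  | [] => (0, [])
  | [r] => (0, [r])
  | r :: m :: rest =>
    let s := pairScanB rest
    (s.1 + m, (r - m) :: s.2)

def solution_alt (abilities : List Int) (k : Int) : Int :=
  let ab := PySem.List.sorted abilities (fun x => x) true
  let s := pairScanB ab
  -- `for _ in range(k): best = max(diffs); total += best; diffs.remove(best)`;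
  -- max(diffs) raises on an empty list — Pre_solution excludes that (k > number of pairs)
  let fin := (PySem.List.pyRange 0 k 1).foldl
    (fun (st : Int × List Int) _ =>
      match PySem.List.max? st.2 (fun x => x) with
      | some best => (st.1 + best, (PySem.List.remove? st.2 best).getD st.2)
      | none => st)
    (s.1, s.2)
  fin.1

-- ===== PRECONDITION & SPEC =====
-- A raises IndexError (and B ValueError) exactly when k exceeds the number of pairs; Pre_ excludes only that.
def Pre_solution (abilities : List Int) (k : Int) : Prop :=
  2 * k ≤ (abilities.length : Int) + 1
instance (abilities : List Int) (k : Int) : Decidable (Pre_solution abilities k) := by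
  unfold Pre_solution; infer_instance
def pvWitness_solution : List Int × Int := ([3, 1, 2, 5], 1)

def Spec_solution (abilities : List Int) (k : Int) (out : Int) : Prop := out = solution_alt abilities k
instance (abilities : List Int) (k : Int) (out : Int) : Decidable (Spec_solution abilities k out) := by unfold Spec_solution; infer_instance

-- ===== CLAIM (what is proved, stated in full; the proofs are below) =====
def Claim_equal_solution : Prop := ∀ (abilities : List Int) (k : Int), Dom_solution abilities k → Pre_solution abilities k → Spec_solution abilities k (solution abilities k)


-- ===== LEMMAS AND PROOFS =====

-- pvA / pvB: the bodies of the two ports after the shared initial sort (rfl-equal to the ports).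
def pvA (ab : List Int) (k : Int) : Int :=
  let m : Nat := (PySem.Int.floordiv ((ab.length : Int) + 1) 2).toNat
  let s1 := (PySem.List.pyRange 0 (ab.length : Int) 1).foldl
    (fun (s : List Int × List Int) (i : Int) =>
      if PySem.Int.mod i 2 == 0 then
        (s.1.set (PySem.Int.floordiv i 2).toNat
           (s.1.getD (PySem.Int.floordiv i 2).toNat 0 + PySem.List.pyGetD ab i 0), s.2)
      else
        (s.1, s.2.set (PySem.Int.floordiv i 2).toNat
           (s.2.getD (PySem.Int.floordiv i 2).toNat 0 + PySem.List.pyGetD ab i 0)))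
    (List.replicate m 0, List.replicate m 0)
  let dif := (PySem.List.enumerate (s1.1.zip s1.2) 0).map (fun p => (p.2.1 - p.2.2, p.1))
  let difS := PySem.List.sorted dif (fun x => x.1) true
  let s2 := (PySem.List.pyRange 0 k 1).foldl
    (fun (s : List Int × List Int) (i : Int) =>
      let j := (PySem.List.pyGetD difS i (0, 0)).2.toNat
      (s.1.set j (s.2.getD j 0), s.2.set j (s.1.getD j 0)))
    (s1.1, s1.2)
  s2.2.sum

-- the extraction step of B: add the (first) maximum, remove its first occurrence
def pvExtract (st : Int × List Int) : Int × List Int :=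
  match PySem.List.max? st.2 (fun x => x) with
  | some best => (st.1 + best, (PySem.List.remove? st.2 best).getD st.2)
  | none => st

def pvB (ab : List Int) (k : Int) : Int :=
  let s := pairScanB ab
  ((PySem.List.pyRange 0 k 1).foldl (fun st _ => pvExtract st) (s.1, s.2)).1

lemma solution_eq_pvA (abilities : List Int) (k : Int) :
    solution abilities k = pvA (PySem.List.sorted abilities (fun x => x) true) k := rfl

lemma solution_alt_eq_pvB (abilities : List Int) (k : Int) :
    solution_alt abilities k = pvB (PySem.List.sorted abilities (fun x => x) true) k := rfl

-- elements at even / odd positions; odd side padded with 0 for a lone last element (as A's `me` array is)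
def pvEvens : List Int → List Int
  | [] => []
  | [r] => [r]
  | r :: _ :: t => r :: pvEvens t

def pvOdds : List Int → List Int
  | [] => []
  | [_] => [0]
  | _ :: m :: t => m :: pvOdds t

lemma length_pvEvens (xs : List Int) : (pvEvens xs).length = (xs.length + 1) / 2 := by
  induction xs using pvEvens.induct with
  | case1 => simp [pvEvens]
  | case2 r => simp [pvEvens]
  | case3 r m t ih => simp [pvEvens, ih]; omega

lemma length_pvOdds (xs : List Int) : (pvOdds xs).length = (xs.length + 1) / 2 := by
  induction xs using pvOdds.induct with
  | case1 => simp [pvOdds]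
  | case2 r => simp [pvOdds]
  | case3 r m t ih => simp [pvOdds, ih]; omega

lemma getD_pvEvens (xs : List Int) (j : Nat) :
    (pvEvens xs).getD j 0 = if 2 * j < xs.length then xs.getD (2 * j) 0 else 0 := by
  induction xs using pvEvens.induct generalizing j with
  | case1 => simp [pvEvens]
  | case2 r => cases j <;> simp [pvEvens]
  | case3 r m t ih =>
    cases j with
    | zero => simp [pvEvens]
    | succ j =>
      have e : 2 * (j + 1) = 2 * j + 1 + 1 := by omega
      simp only [pvEvens]
      rw [List.getD_cons_succ, ih, e, List.getD_cons_succ, List.getD_cons_succ]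
      simp only [List.length_cons,
        show (2 * j + 1 + 1 < t.length + 1 + 1) ↔ (2 * j < t.length) by omega]

lemma getD_pvOdds (xs : List Int) (j : Nat) :
    (pvOdds xs).getD j 0 = if 2 * j + 1 < xs.length then xs.getD (2 * j + 1) 0 else 0 := by
  induction xs using pvOdds.induct generalizing j with
  | case1 => simp [pvOdds]
  | case2 r => cases j <;> simp [pvOdds]
  | case3 r m t ih =>
    cases j with
    | zero => simp [pvOdds]
    | succ j =>
      have e : 2 * (j + 1) + 1 = 2 * j + 1 + 1 + 1 := by omega
      simp only [pvOdds]
      rw [List.getD_cons_succ, ih, e, List.getD_cons_succ, List.getD_cons_succ]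
      simp only [List.length_cons,
        show (2 * j + 1 + 1 + 1 < t.length + 1 + 1) ↔ (2 * j + 1 < t.length) by omega]

lemma pairScanB_eq (xs : List Int) :
    pairScanB xs = ((pvOdds xs).sum, List.zipWith (· - ·) (pvEvens xs) (pvOdds xs)) := by
  induction xs using pairScanB.induct with
  | case1 => simp [pairScanB, pvEvens, pvOdds]
  | case2 r => simp [pairScanB, pvEvens, pvOdds]
  | case3 r m t ih => simp [pairScanB, pvEvens, pvOdds, ih]; ring

-- the scatter loop body of A, on Nat indices
def pvScat (ab : List Int) (s : List Int × List Int) (i : Nat) : List Int × List Int :=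
  if i % 2 == 0 then (s.1.set (i / 2) (s.1.getD (i / 2) 0 + ab.getD i 0), s.2)
  else (s.1, s.2.set (i / 2) (s.2.getD (i / 2) 0 + ab.getD i 0))

lemma pv_getD_set_self (l : List Int) (i : Nat) (v : Int) (h : i < l.length) :
    (l.set i v).getD i 0 = v := by
  rw [List.getD_eq_getElem _ _ (by simpa using h), List.getElem_set_self]
lemma pv_scatter_inv (ab : List Int) (t : Nat) (ht : t ≤ ab.length) :
    (((List.range t).foldl (pvScat ab)
        (List.replicate ((ab.length + 1) / 2) 0, List.replicate ((ab.length + 1) / 2) 0)).1.length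
      = (ab.length + 1) / 2) ∧
    (((List.range t).foldl (pvScat ab)
        (List.replicate ((ab.length + 1) / 2) 0, List.replicate ((ab.length + 1) / 2) 0)).2.length
      = (ab.length + 1) / 2) ∧
    (∀ j, ((List.range t).foldl (pvScat ab)
        (List.replicate ((ab.length + 1) / 2) 0, List.replicate ((ab.length + 1) / 2) 0)).1.getD j 0
      = if 2 * j < t then ab.getD (2 * j) 0 else 0) ∧
    (∀ j, ((List.range t).foldl (pvScat ab)
        (List.replicate ((ab.length + 1) / 2) 0, List.replicate ((ab.length + 1) / 2) 0)).2.getD j 0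
      = if 2 * j + 1 < t then ab.getD (2 * j + 1) 0 else 0) := by
  induction t with
  | zero =>
    refine ⟨by simp, by simp, ?_, ?_⟩ <;> intro j <;>
      simp [List.getD_eq_getElem?_getD, List.getElem?_replicate] <;> split_ifs <;> rfl
  | succ t ih =>
    obtain ⟨h1, h2, h3, h4⟩ := ih (by omega)
    set st := (List.range t).foldl (pvScat ab)
      (List.replicate ((ab.length + 1) / 2) 0, List.replicate ((ab.length + 1) / 2) 0) with hst
    rw [List.range_succ, List.foldl_append, List.foldl_cons, List.foldl_nil, ← hst]
    by_cases hpar : t % 2 = 0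
    · have hstep : pvScat ab st t
          = (st.1.set (t / 2) (st.1.getD (t / 2) 0 + ab.getD t 0), st.2) := by
        simp [pvScat, hpar]
      rw [hstep]
      have hlt : t / 2 < (ab.length + 1) / 2 := by omega
      refine ⟨by simp [h1], h2, ?_, ?_⟩
      · intro j
        by_cases hje : j = t / 2
        · subst hje
          have hv : st.1.getD (t / 2) 0 = 0 := by
            rw [h3]; simp [show ¬ 2 * (t / 2) < t by omega]
          rw [pv_getD_set_self _ _ _ (by rw [h1]; omega), hv, zero_add]
          rw [show 2 * (t / 2) = t from by omega, if_pos (by omega : t < t + 1)]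
        · have : (st.1.set (t / 2) (st.1.getD (t / 2) 0 + ab.getD t 0)).getD j 0
              = st.1.getD j 0 := by
            simp [List.getD_eq_getElem?_getD, List.getElem?_set_ne (by omega : t / 2 ≠ j)]
          rw [this, h3]
          simp only [show (2 * j < t + 1) ↔ (2 * j < t) from by omega]
      · intro j
        rw [h4]
        simp only [show (2 * j + 1 < t + 1) ↔ (2 * j + 1 < t) from by omega]
    · have hstep : pvScat ab st t
          = (st.1, st.2.set (t / 2) (st.2.getD (t / 2) 0 + ab.getD t 0)) := by
        simp [pvScat, hpar]
      rw [hstep]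
      have hlt : t / 2 < (ab.length + 1) / 2 := by omega
      refine ⟨h1, by simp [h2], ?_, ?_⟩
      · intro j
        rw [h3]
        simp only [show (2 * j < t + 1) ↔ (2 * j < t) from by omega]
      · intro j
        by_cases hje : j = t / 2
        · subst hje
          have hv : st.2.getD (t / 2) 0 = 0 := by
            rw [h4]; simp [show ¬ 2 * (t / 2) + 1 < t by omega]
          rw [pv_getD_set_self _ _ _ (by rw [h2]; omega), hv, zero_add]
          rw [show 2 * (t / 2) + 1 = t from by omega, if_pos (by omega : t < t + 1)]
        · have : (st.2.set (t / 2) (st.2.getD (t / 2) 0 + ab.getD t 0)).getD j 0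
              = st.2.getD j 0 := by
            simp [List.getD_eq_getElem?_getD, List.getElem?_set_ne (by omega : t / 2 ≠ j)]
          rw [this, h4]
          simp only [show (2 * j + 1 < t + 1) ↔ (2 * j + 1 < t) from by omega]

lemma pv_scatter_eq (ab : List Int) :
    (List.range ab.length).foldl (pvScat ab)
      (List.replicate ((ab.length + 1) / 2) 0, List.replicate ((ab.length + 1) / 2) 0)
      = (pvEvens ab, pvOdds ab) := by
  obtain ⟨h1, h2, h3, h4⟩ := pv_scatter_inv ab ab.length le_rfl
  refine Prod.ext ?_ ?_
  · apply List.ext_getElem (by rw [h1, length_pvEvens])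
    intro i hi1 hi2
    have ha := h3 i
    rw [List.getD_eq_getElem _ _ hi1] at ha
    have hb := getD_pvEvens ab i
    rw [List.getD_eq_getElem _ _ hi2] at hb
    rw [ha, hb]
  · apply List.ext_getElem (by rw [h2, length_pvOdds])
    intro i hi1 hi2
    have ha := h4 i
    rw [List.getD_eq_getElem _ _ hi1] at ha
    have hb := getD_pvOdds ab i
    rw [List.getD_eq_getElem _ _ hi2] at hb
    rw [ha, hb]

-- sum after an in-range update
lemma pv_sum_set (l : List Int) (j : Nat) (v : Int) (h : j < l.length) :
    (l.set j v).sum = l.sum - l.getD j 0 + v := by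
  induction l generalizing j with
  | nil => simp at h
  | cons a l ih =>
    cases j with
    | zero => simp [List.sum_cons]; ring
    | succ j =>
      simp only [List.set_cons_succ, List.sum_cons, List.getD_cons_succ,
        ih j (by simpa using h)]
      ring

-- reading a prefix of xs through indices = folding over xs.take t
lemma pv_foldl_range_getD {a b : Type} (xs : List a) (d : a) (g : b → a → b) (init : b)
    (t : Nat) (ht : t ≤ xs.length) :
    (List.range t).foldl (fun s i => g s (xs.getD i d)) init = (xs.take t).foldl g init := by
  induction t with
  | zero => simp
  | succ t ih =>
    rw [List.range_succ, List.foldl_append, ih (by omega),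
      List.take_add_one, List.foldl_append]
    have h1 : xs[t]? = some xs[t] := List.getElem?_eq_getElem (by omega)
    simp [h1, List.getD_eq_getElem?_getD]

-- a descending rearrangement IS sorted(xs, reverse=True) (Int values; ties carry equal values)
lemma pv_sorted_rev_eq (xs ys : List Int) (hp : ys.Perm xs)
    (hs : ys.Pairwise (fun a b : Int => b <= a)) :
    PySem.List.sorted xs (fun x => x) true = ys := by
  have h1 := PySem.List.sorted_perm xs (fun x => x) true
  have h2 := PySem.List.sorted_pairwise_rev xs (fun x => x)
  exact (h1.trans hp.symm).eq_of_pairwise (fun a b _ _ hab hba => le_antisymm hba hab) h2 hs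

-- the swap loop body of A
def pvSwap (s : List Int × List Int) (p : Int × Int) : List Int × List Int :=
  (s.1.set p.2.toNat (s.2.getD p.2.toNat 0), s.2.set p.2.toNat (s.1.getD p.2.toNat 0))

-- swapping at distinct in-range indices adds each stored difference once to sum(me)
lemma pv_swap_sum (ps : List (Int × Int)) (r me : List Int) (hlen : r.length = me.length)
    (hmem : ∀ p ∈ ps, ∃ j : Nat, j < me.length ∧ p.2 = (j : Int) ∧
      p.1 = r.getD j 0 - me.getD j 0)
    (hnd : (ps.map (fun p => p.2)).Nodup) :
    ((ps.foldl pvSwap (r, me)).2).sum = me.sum + (ps.map (fun p => p.1)).sum := by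
  induction ps generalizing r me with
  | nil => simp
  | cons p ps ih =>
    obtain ⟨j, hj, hp2, hp1⟩ := hmem p (by simp)
    simp only [List.foldl_cons, List.map_cons, List.sum_cons]
    have hstep : pvSwap (r, me) p = (r.set j (me.getD j 0), me.set j (r.getD j 0)) := by
      simp [pvSwap, hp2]
    rw [hstep]
    have hnd' : (ps.map (fun p => p.2)).Nodup := (List.nodup_cons.mp hnd).2
    have hpnot : p.2 ∉ ps.map (fun p => p.2) := (List.nodup_cons.mp hnd).1
    have hmem' : ∀ q ∈ ps, ∃ j' : Nat, j' < (me.set j (r.getD j 0)).length ∧ q.2 = (j' : Int) ∧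
        q.1 = (r.set j (me.getD j 0)).getD j' 0 - (me.set j (r.getD j 0)).getD j' 0 := by
      intro q hq
      obtain ⟨j', hj', hq2, hq1⟩ := hmem q (List.mem_cons_of_mem _ hq)
      refine ⟨j', by simpa using hj', hq2, ?_⟩
      have hne : j ≠ j' := by
        intro h
        apply hpnot
        have : p.2 = q.2 := by rw [hp2, hq2, h]
        rw [this]
        exact List.mem_map_of_mem hq
      simp [List.getD_eq_getElem?_getD, List.getElem?_set_ne hne, hq1]
    rw [ih _ _ (by simp [hlen]) hmem' hnd',
      pv_sum_set me j (r.getD j 0) hj, hp1]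
    ring

lemma pv_scatter_eq' (ab : List Int) :
    List.foldl
      (fun (s : List Int × List Int) (i : Int) =>
        if PySem.Int.mod i 2 == 0 then
          (s.1.set (PySem.Int.floordiv i 2).toNat
             (s.1.getD (PySem.Int.floordiv i 2).toNat 0 + PySem.List.pyGetD ab i 0), s.2)
        else
          (s.1, s.2.set (PySem.Int.floordiv i 2).toNat
             (s.2.getD (PySem.Int.floordiv i 2).toNat 0 + PySem.List.pyGetD ab i 0)))
      (List.replicate ((ab.length + 1) / 2) 0, List.replicate ((ab.length + 1) / 2) 0)
      (PySem.List.pyRange 0 (ab.length : Int) 1)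
      = (pvEvens ab, pvOdds ab) := by
  rw [PySem.List.pyRange_zero_natCast, List.foldl_map]
  have hfun : ∀ (s : List Int × List Int) (i : Nat),
      (if PySem.Int.mod (i : Int) 2 == 0 then
          (s.1.set (PySem.Int.floordiv (i : Int) 2).toNat
             (s.1.getD (PySem.Int.floordiv (i : Int) 2).toNat 0 + PySem.List.pyGetD ab (i : Int) 0), s.2)
        else
          (s.1, s.2.set (PySem.Int.floordiv (i : Int) 2).toNat
             (s.2.getD (PySem.Int.floordiv (i : Int) 2).toNat 0 + PySem.List.pyGetD ab (i : Int) 0)))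
        = pvScat ab s i := by
    intro s i
    have e1 : PySem.Int.mod (i : Int) 2 = ((i % 2 : Nat) : Int) := by
      rw [PySem.Int.mod_eq_emod_of_pos (by norm_num)]; omega
    have e2 : (PySem.Int.floordiv (i : Int) 2).toNat = i / 2 := by
      rw [PySem.Int.floordiv_eq_ediv_of_pos (by norm_num)]; omega
    rw [pvScat, e1, e2, PySem.List.pyGetD_natCast]
    by_cases h : i % 2 = 0
    · simp [h]
    · simp [h]
      intro hd
      exfalso
      omega
  simp only [hfun]
  exact pv_scatter_eq ab

-- extracting the (first) maximum value peels the head of the descending sort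
lemma pv_max_head (ds : List Int) (v : Int)
    (hv : PySem.List.max? ds (fun x => x) = some v) :
    PySem.List.sorted ds (fun x => x) true = v :: PySem.List.sorted (ds.erase v) (fun x => x) true := by
  have hvmem : v ∈ ds := PySem.List.max?_mem hv
  have hvmax : ∀ y ∈ ds, y ≤ v := PySem.List.max?_isMax hv
  have hne : ds ≠ [] := by rintro rfl; simp at hvmem
  obtain ⟨h, rest, hS⟩ : ∃ h rest, PySem.List.sorted ds (fun x => x) true = h :: rest := by
    cases hS : PySem.List.sorted ds (fun x => x) true with
    | nil => exact absurd ((PySem.List.sorted_eq_nil_iff _ _ _).mp hS) hne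
    | cons h rest => exact ⟨h, rest, rfl⟩
  have hperm : (h :: rest).Perm ds := hS ▸ PySem.List.sorted_perm ds (fun x => x) true
  have hpw : (h :: rest).Pairwise (fun a b : Int => b ≤ a) :=
    hS ▸ PySem.List.sorted_pairwise_rev ds (fun x => x)
  have hhge : ∀ y ∈ ds, y ≤ h := PySem.List.key_head_sorted_rev_ge ds (fun x => x) hS
  have hhmem : h ∈ ds := hperm.mem_iff.mp (by simp)
  have hhv : h = v := le_antisymm (hvmax h hhmem) (hhge v hvmem)
  subst hhv
  rw [hS]
  congr 1
  have hpr : rest.Perm (ds.erase h) := by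
    have := hperm.erase h
    simpa using this
  exact (pv_sorted_rev_eq _ _ hpr (List.Pairwise.of_cons hpw)).symm

-- k rounds of max extraction add the sum of the k largest values
lemma pv_extract_iter (n : Nat) (t : Int) (ds : List Int) (hn : n ≤ ds.length) :
    (pvExtract^[n] (t, ds)).1
      = t + ((PySem.List.sorted ds (fun x => x) true).take n).sum := by
  induction n generalizing t ds with
  | zero => simp
  | succ n ih =>
    have hne : ds ≠ [] := by intro h; subst h; simp at hn
    obtain ⟨v, hv⟩ : ∃ v, PySem.List.max? ds (fun x => x) = some v := by
      cases h : PySem.List.max? ds (fun x => x) with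
      | none => exact absurd ((PySem.List.max?_eq_none_iff _ _).mp h) hne
      | some v => exact ⟨v, rfl⟩
    have hvmem : v ∈ ds := PySem.List.max?_mem hv
    have hstep : pvExtract (t, ds) = (t + v, ds.erase v) := by
      simp [pvExtract, hv, PySem.List.remove?_eq_some_erase ds v hvmem]
    rw [Function.iterate_succ_apply, hstep,
      ih (t + v) (ds.erase v) (by rw [List.length_erase_of_mem hvmem]; omega),
      pv_max_head ds v hv]
    simp
    ring

-- a fold whose body ignores the element is function iteration
lemma pv_foldl_iterate {a b : Type} (f : b → b) (init : b) (l : List a) :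
    l.foldl (fun s _ => f s) init = f^[l.length] init := by
  induction l generalizing init with
  | nil => simp
  | cons x l ih => simp [List.foldl_cons, ih, Function.iterate_succ_apply]

lemma pv_main (ab : List Int) (k : Int) (hk : k <= ((ab.length : Int) + 1) / 2) :
    pvA ab k = pvB ab k := by
  have hm : (PySem.Int.floordiv ((ab.length : Int) + 1) 2).toNat = (ab.length + 1) / 2 := by
    rw [show ((ab.length : Int) + 1) = ((ab.length + 1 : Nat) : Int) by push_cast; ring,
      show (2 : Int) = ((2 : Nat) : Int) by norm_num, PySem.Int.floordiv_natCast]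
    omega
  simp only [pvA, pvB, hm]
  rw [pv_scatter_eq' ab]
  simp only []
  set E := pvEvens ab with hE
  set O := pvOdds ab with hO
  set dif := (PySem.List.enumerate (E.zip O) 0).map (fun p => (p.2.1 - p.2.2, p.1)) with hdif
  set difS := PySem.List.sorted dif (fun x => x.1) true with hdifS
  have hlenEO : E.length = O.length := by rw [hE, hO, length_pvEvens, length_pvOdds]
  have hdifSlen : difS.length = (ab.length + 1) / 2 := by
    rw [hdifS, PySem.List.length_sorted, hdif, List.length_map, PySem.List.length_enumerate,
      List.length_zip, hlenEO, min_self, hO, length_pvOdds]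
  have hfst : dif.map (fun p => p.1) = List.zipWith (· - ·) E O := by
    rw [hdif, List.map_map]
    have h1 : ((fun (p : Int × Int) => p.1) ∘ (fun p : Int × (Int × Int) => (p.2.1 - p.2.2, p.1)))
        = (fun (q : Int × Int) => q.1 - q.2) ∘ Prod.snd := rfl
    rw [h1, ← List.map_map, PySem.List.map_snd_enumerate]
    have h2 : (fun (q : Int × Int) => q.1 - q.2) = Function.uncurry (· - ·) := rfl
    rw [h2, List.map_uncurry_zip_eq_zipWith]
  have hsnd : dif.map (fun p => p.2) = PySem.List.pyRange 0 ((E.zip O).length : Int) 1 := by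
    rw [hdif, List.map_map]
    have h1 : ((fun (p : Int × Int) => p.2) ∘ (fun p : Int × (Int × Int) => (p.2.1 - p.2.2, p.1)))
        = fun p : Int × (Int × Int) => p.1 := rfl
    rw [h1, PySem.List.map_fst_enumerate]
    simp
  have hnd : (dif.map (fun p => p.2)).Nodup := by
    rw [hsnd]; exact PySem.List.nodup_pyRange_one _ _
  have hmemdif : ∀ p ∈ dif, ∃ j : Nat, j < O.length ∧ p.2 = (j : Int) ∧
      p.1 = E.getD j 0 - O.getD j 0 := by
    intro p hp
    rw [hdif] at hp
    obtain ⟨q, hq, rfl⟩ := List.mem_map.mp hp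
    obtain ⟨kk, hkk, rfl⟩ := (PySem.List.mem_enumerate_iff _ _ _).mp hq
    have hkE : kk < E.length := by rw [List.length_zip] at hkk; omega
    have hkO : kk < O.length := by rw [List.length_zip] at hkk; omega
    refine ⟨kk, hkO, by simp, ?_⟩
    simp only [List.getElem_zip]
    rw [List.getD_eq_getElem _ _ hkE, List.getD_eq_getElem _ _ hkO]
  have hpermS : difS.Perm dif := PySem.List.sorted_perm _ _ _
  have hmemS : ∀ p ∈ difS, ∃ j : Nat, j < O.length ∧ p.2 = (j : Int) ∧
      p.1 = E.getD j 0 - O.getD j 0 :=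
    fun p hp => hmemdif p ((PySem.List.mem_sorted _ _ _ _).mp hp)
  have hndS : (difS.map (fun p => p.2)).Nodup := ((hpermS.map _).nodup_iff).mpr hnd
  have hsorted_eq : PySem.List.sorted (List.zipWith (· - ·) E O) (fun x => x) true
      = difS.map (fun p => p.1) := by
    apply pv_sorted_rev_eq
    · rw [← hfst]; exact hpermS.map _
    · exact List.Pairwise.map _ (fun a b h => h)
        (PySem.List.sorted_pairwise_rev dif (fun x => x.1))
  have hB2 : (pairScanB ab).2 = List.zipWith (· - ·) E O := by rw [pairScanB_eq]
  have hB1 : (pairScanB ab).1 = O.sum := by rw [pairScanB_eq]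
  -- B's value
  have hBlen : (List.zipWith (· - ·) E O).length = (ab.length + 1) / 2 := by
    rw [List.length_zipWith, hlenEO, min_self, hO, length_pvOdds]
  by_cases hk0 : k ≤ 0
  · rw [PySem.List.pyRange_one_eq_nil hk0]
    simp [hB1]
  · have hkt : k = ((k.toNat : Nat) : Int) := (Int.toNat_of_nonneg (by omega)).symm
    have htle : k.toNat ≤ (ab.length + 1) / 2 := by
      have hcast : ((ab.length : Int) + 1) / 2 = (((ab.length + 1) / 2 : Nat) : Int) := by
        omega
      omega
    have hBside : ((PySem.List.pyRange 0 k 1).foldl (fun st _ => pvExtract st)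
          ((pairScanB ab).1, (pairScanB ab).2)).1
        = O.sum + ((difS.map (fun p => p.1)).take k.toNat).sum := by
      rw [pv_foldl_iterate pvExtract _ _, PySem.List.length_pyRange_one,
        show (k - 0).toNat = k.toNat by omega, hB1, hB2,
        pv_extract_iter k.toNat O.sum _ (by rw [hBlen]; exact htle), hsorted_eq]
    rw [hBside]
    -- A's value
    rw [hkt, PySem.List.pyRange_zero_natCast, List.foldl_map]
    simp only [PySem.List.pyGetD_natCast]
    rw [pv_foldl_range_getD difS (0, 0)
        (fun (s : List Int × List Int) (p : Int × Int) =>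
          (s.1.set p.2.toNat (s.2.getD p.2.toNat 0), s.2.set p.2.toNat (s.1.getD p.2.toNat 0)))
        (E, O) k.toNat (by rw [hdifSlen]; exact htle)]
    have hswap : ((difS.take k.toNat).foldl pvSwap (E, O)).2.sum
        = O.sum + ((difS.take k.toNat).map (fun p => p.1)).sum := by
      apply pv_swap_sum _ _ _ hlenEO
      · intro p hp
        exact hmemS p (List.mem_of_mem_take hp)
      · rw [List.map_take]
        exact hndS.sublist (List.take_sublist _ _)
    rw [show (fun (s : List Int × List Int) (p : Int × Int) =>
          (s.1.set p.2.toNat (s.2.getD p.2.toNat 0), s.2.set p.2.toNat (s.1.getD p.2.toNat 0)))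
        = pvSwap from rfl, hswap, List.map_take]
    simp only [Int.toNat_natCast]

-- ===== VERDICT (by name: the statement is the Claim_ definition above) =====
theorem solution_spec : Claim_equal_solution := by
  intro abilities k _ hpre
  unfold Spec_solution
  rw [solution_eq_pvA, solution_alt_eq_pvB]
  unfold Pre_solution at hpre
  refine pv_main _ k ?_
  rw [PySem.List.length_sorted]
  omega
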